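-- pv_equiv track=rewrite | github.com/worthyl/adventofcode | 2024/day14/day14p2.py | simulate_robots
-- ===== SOURCE A (Python) =====
-- def simulate_robots(robots, width, height, seconds):
--     for _ in range(seconds):
--         new_positions = []
--         for (p_x, p_y), (v_x, v_y) in robots:
--             new_x = (p_x + v_x) % width
--             new_y = (p_y + v_y) % height
--             new_positions.append((new_x, new_y))
--         robots = [(pos, vel) for pos, vel in zip(new_positions, [vel for _, vel in robots])]
--     return [pos for pos, _ in robots]
-- ===== SOURCE B (Python) =====
-- def simulate_robots(robots, width, height, seconds):
--     if seconds <= 0: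
--         return [p for p, _ in robots]
--     return [((p_x + v_x * seconds) % width, (p_y + v_y * seconds) % height)
--             for (p_x, p_y), (v_x, v_y) in robots]
-- ===== Notes on version B (the rewrite author's own statement) =====
-- stated objective: faster
-- what changed: Replaces the seconds-long step-by-step simulation loop with a single closed-form pass computing (p + v*seconds) % dim per robot.
import Mathlib
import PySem

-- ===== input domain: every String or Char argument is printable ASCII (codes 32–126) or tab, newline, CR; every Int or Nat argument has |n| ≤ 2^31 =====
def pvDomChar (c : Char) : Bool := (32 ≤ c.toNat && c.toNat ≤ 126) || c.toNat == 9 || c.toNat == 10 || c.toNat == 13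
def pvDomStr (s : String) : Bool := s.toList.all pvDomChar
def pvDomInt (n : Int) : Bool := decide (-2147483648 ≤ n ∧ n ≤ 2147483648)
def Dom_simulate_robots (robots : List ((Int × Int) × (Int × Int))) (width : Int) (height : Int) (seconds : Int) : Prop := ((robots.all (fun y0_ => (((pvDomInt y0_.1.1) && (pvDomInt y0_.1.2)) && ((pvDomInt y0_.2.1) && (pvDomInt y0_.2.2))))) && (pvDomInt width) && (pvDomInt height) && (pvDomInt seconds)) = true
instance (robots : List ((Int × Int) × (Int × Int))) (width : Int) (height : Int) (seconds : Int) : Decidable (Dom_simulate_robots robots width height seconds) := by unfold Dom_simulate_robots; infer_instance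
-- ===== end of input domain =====

-- B replaces A's seconds-long step-by-step simulation with one closed-form pass
-- ((p + v*seconds) % dim per robot): asymptotically faster (O(n) vs O(n*seconds)).

-- ===== PORT A =====
-- one simulation step: the inner for-loop appending to new_positions, then the zip comprehension
def pvStepA (width height : Int) (rb : List ((Int × Int) × (Int × Int))) :
    List ((Int × Int) × (Int × Int)) :=
  let new_positions := rb.foldl (fun acc pv =>
    acc ++ [(PySem.Int.mod (pv.1.1 + pv.2.1) width, PySem.Int.mod (pv.1.2 + pv.2.2) height)]) []
  List.zip new_positions (rb.map (fun pv => pv.2))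

def simulate_robots (robots : List ((Int × Int) × (Int × Int))) (width : Int) (height : Int) (seconds : Int) : List (Int × Int) :=
  ((PySem.List.pyRange 0 seconds 1).foldl (fun rb _ => pvStepA width height rb) robots).map
    (fun pv => pv.1)

-- ===== PORT B =====
def simulate_robots_alt (robots : List ((Int × Int) × (Int × Int))) (width : Int) (height : Int) (seconds : Int) : List (Int × Int) :=
  if seconds ≤ 0 then
    robots.map (fun pv => pv.1)
  else
    robots.map (fun pv =>
      (PySem.Int.mod (pv.1.1 + pv.2.1 * seconds) width,
       PySem.Int.mod (pv.1.2 + pv.2.2 * seconds) height))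

-- ===== PRECONDITION & SPEC =====
-- Pre_ excludes exactly the inputs where Python A raises ZeroDivisionError:
-- the mod by width/height is reached (seconds ≥ 1 and robots non-empty) while width or height is 0.
def Pre_simulate_robots (robots : List ((Int × Int) × (Int × Int))) (width : Int) (height : Int) (seconds : Int) : Prop :=
  seconds ≤ 0 ∨ robots = [] ∨ (width ≠ 0 ∧ height ≠ 0)
instance (robots : List ((Int × Int) × (Int × Int))) (width : Int) (height : Int) (seconds : Int) : Decidable (Pre_simulate_robots robots width height seconds) := by unfold Pre_simulate_robots; infer_instance

def pvWitness_simulate_robots : (List ((Int × Int) × (Int × Int))) × Int × Int × Int :=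
  ([((1, 2), (3, -5))], 7, 4, 3)

def Spec_simulate_robots (robots : List ((Int × Int) × (Int × Int))) (width : Int) (height : Int) (seconds : Int) (out : List (Int × Int)) : Prop := out = simulate_robots_alt robots width height seconds
instance (robots : List ((Int × Int) × (Int × Int))) (width : Int) (height : Int) (seconds : Int) (out : List (Int × Int)) : Decidable (Spec_simulate_robots robots width height seconds out) := by unfold Spec_simulate_robots; infer_instance

-- ===== CLAIM (what is proved, stated in full; the proofs are below) =====
def Claim_equal_simulate_robots : Prop := ∀ (robots : List ((Int × Int) × (Int × Int))) (width : Int) (height : Int) (seconds : Int), Dom_simulate_robots robots width height seconds → Pre_simulate_robots robots width height seconds → Spec_simulate_robots robots width height seconds (simulate_robots robots width height seconds)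

-- ===== LEMMAS AND PROOFS =====

-- closed form of one robot's position after n+1 steps
def pvPos (width height : Int) (n : Nat) (pv : (Int × Int) × (Int × Int)) : Int × Int :=
  (PySem.Int.mod (pv.1.1 + pv.2.1 * (n + 1)) width,
   PySem.Int.mod (pv.1.2 + pv.2.2 * (n + 1)) height)

theorem pv_mod_add_mod (a b w : Int) :
    PySem.Int.mod (PySem.Int.mod a w + b) w = PySem.Int.mod (a + b) w := by
  have h : PySem.Int.mod a w = a + (- PySem.Int.floordiv a w) * w := by
    have := PySem.Int.floordiv_mul_add_mod a w
    linarith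
  rw [h, add_right_comm]
  simp [PySem.Int.mod]

theorem pvStepA_map (width height : Int) (rb : List ((Int × Int) × (Int × Int))) :
    pvStepA width height rb =
      rb.map (fun pv =>
        ((PySem.Int.mod (pv.1.1 + pv.2.1) width, PySem.Int.mod (pv.1.2 + pv.2.2) height), pv.2)) := by
  unfold pvStepA
  rw [PySem.List.foldl_append_singleton_eq_map]
  simp only [List.nil_append]
  rw [List.zip_map']

theorem pv_iter_closed (width height : Int) (n : Nat) :
    ∀ rb : List ((Int × Int) × (Int × Int)),
      Nat.iterate (pvStepA width height) (n + 1) rb =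
        rb.map (fun pv => (pvPos width height n pv, pv.2)) := by
  induction n with
  | zero =>
    intro rb
    simp [pvStepA_map, pvPos]
  | succ m ih =>
    intro rb
    rw [Function.iterate_succ_apply', ih, pvStepA_map, List.map_map]
    apply List.map_congr_left
    intro pv _
    simp only [Function.comp, pvPos, pv_mod_add_mod]
    push_cast
    ring_nf

theorem pv_foldl_iterate (width height : Int) (l : List Int) :
    ∀ rb : List ((Int × Int) × (Int × Int)),
      l.foldl (fun rb _ => pvStepA width height rb) rb =
        Nat.iterate (pvStepA width height) l.length rb := by
  induction l with
  | nil => intro rb; rfl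
  | cons x xs ih =>
    intro rb
    simp only [List.foldl_cons, List.length_cons, ih, Function.iterate_succ_apply]

theorem pv_equal (robots : List ((Int × Int) × (Int × Int))) (width height seconds : Int) :
    simulate_robots robots width height seconds =
      simulate_robots_alt robots width height seconds := by
  unfold simulate_robots simulate_robots_alt
  rw [pv_foldl_iterate, PySem.List.length_pyRange_one]
  simp only [Int.sub_zero]
  by_cases hs : seconds ≤ 0
  · have h0 : seconds.toNat = 0 := by omega
    simp [h0, hs]
  · have hpos : 0 < seconds := by omega
    obtain ⟨n, hn⟩ : ∃ n : Nat, seconds.toNat = n + 1 := ⟨seconds.toNat - 1, by omega⟩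
    rw [hn, pv_iter_closed, List.map_map]
    have hsec : ((n : Int) + 1) = seconds := by omega
    simp only [if_neg hs]
    apply List.map_congr_left
    intro pv _
    simp only [Function.comp, pvPos]
    rw [hsec]

-- ===== VERDICT (by name: the statement is the Claim_ definition above) =====
theorem simulate_robots_spec : Claim_equal_simulate_robots := by
  intro robots width height seconds _ _
  unfold Spec_simulate_robots
  exact pv_equal robots width height seconds
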